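-- pv_equiv track=rewrite | github.com/OctoLeft/COMP3308-A1 | Task4/task4.py | letter_swaps_generator
-- ===== SOURCE A (Python) =====
-- def letter_swaps_generator(letters):
--     swaps = []
--     for i in range(len(letters)):
--         for j in  range(i + 1, len(letters)):
--             if ord(letters[i]) < ord(letters[j]):
--                 swaps.append(letters[i] + letters[j])
--             else:
--                 swaps.append(letters[j] + letters[i])
--     swaps.sort(key=lambda x: (x[0], x[1]))
--     return swaps
-- ===== SOURCE B (Python) =====
-- def letter_swaps_generator(letters):
--     # Count each character once, then emit the sorted pair list directly from
--     # the (sorted, distinct) characters and their multiplicities.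
--     cnt = {}
--     for c in letters:
--         cnt[c] = cnt.get(c, 0) + 1
--     chars = sorted(cnt)
--     swaps = []
--     for i, a in enumerate(chars):
--         swaps.extend([a + a] * (cnt[a] * (cnt[a] - 1) // 2))
--         for b in chars[i + 1:]:
--             swaps.extend([a + b] * (cnt[a] * cnt[b]))
--     return swaps
-- ===== Notes on version B (the rewrite author's own statement) =====
-- stated objective: faster
-- what changed: Instead of materialising all O(n^2) pairs and comparison-sorting them, B counts character multiplicities once, sorts only the distinct characters, and emits the sorted pair list directly by multiplicity arithmetic (count_a*count_b copies of each cross pair, C(count_a,2) of each doubled pair).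
import Mathlib
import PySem

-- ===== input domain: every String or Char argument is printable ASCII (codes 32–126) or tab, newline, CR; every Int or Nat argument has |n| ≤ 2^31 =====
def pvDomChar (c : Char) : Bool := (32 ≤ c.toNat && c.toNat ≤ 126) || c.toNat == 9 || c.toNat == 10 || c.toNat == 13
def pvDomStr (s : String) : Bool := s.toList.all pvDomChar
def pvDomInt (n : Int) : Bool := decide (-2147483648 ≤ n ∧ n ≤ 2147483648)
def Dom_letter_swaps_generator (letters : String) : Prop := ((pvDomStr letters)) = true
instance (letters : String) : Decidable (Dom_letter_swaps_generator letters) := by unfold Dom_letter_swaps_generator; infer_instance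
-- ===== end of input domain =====

-- B replaces "materialise all O(n^2) pairs, then comparison-sort them" by counting
-- character multiplicities once, sorting only the distinct characters, and emitting
-- the sorted pair list directly by multiplicity arithmetic.

-- ===== PORT A =====
-- Python's letters[i] is a 1-char string; comparing such strings / ord values is
-- comparing code points, modelled by Char (.toNat); letters[i] + letters[j] is the
-- 2-char string String.ofList [ci, cj].  Indices from range(len) are in range, so
-- pyGetD with a dummy default is exact.  The sort key lambda x: (x[0], x[1]) is the
-- tuple of the first two characters: PySem.List.sorted2.
def letter_swaps_generator (letters : String) : List String :=
  let swaps : List String :=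
    (PySem.List.pyRange 0 (PySem.Str.len letters) 1).foldl (fun swaps i =>
      (PySem.List.pyRange (i + 1) (PySem.Str.len letters) 1).foldl (fun swaps j =>
        if (PySem.List.pyGetD letters.toList i ' ').toNat < (PySem.List.pyGetD letters.toList j ' ').toNat then
          swaps ++ [String.ofList [PySem.List.pyGetD letters.toList i ' ', PySem.List.pyGetD letters.toList j ' ']]
        else
          swaps ++ [String.ofList [PySem.List.pyGetD letters.toList j ' ', PySem.List.pyGetD letters.toList i ' ']])
        swaps)
      []
  PySem.List.sorted2 swaps
    (fun x => PySem.List.pyGetD x.toList 0 ' ')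
    (fun x => PySem.List.pyGetD x.toList 1 ' ') false

-- ===== PORT B =====
-- cnt[c] = cnt.get(c, 0) + 1 is Dict.insert with getD; sorted(cnt) sorts the keys;
-- [s] * n is pyRepeat; chars[i+1:] is slice; n*(n-1)//2 is floordiv.
def letter_swaps_generator_alt (letters : String) : List String :=
  let cnt : PySem.Dict Char Int :=
    letters.toList.foldl (fun d c => d.insert c (d.getD c 0 + 1)) PySem.Dict.empty
  let chars := PySem.List.sorted cnt.keys (fun x => x) false
  (PySem.List.enumerate chars 0).foldl (fun swaps ia =>
    let swaps := swaps ++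
      PySem.List.pyRepeat [String.ofList [ia.2, ia.2]]
        (PySem.Int.floordiv (cnt.getD ia.2 0 * (cnt.getD ia.2 0 - 1)) 2)
    (PySem.List.slice chars (some (ia.1 + 1)) none).foldl (fun swaps b =>
      swaps ++ PySem.List.pyRepeat [String.ofList [ia.2, b]] (cnt.getD ia.2 0 * cnt.getD b 0))
      swaps)
    []

-- ===== PRECONDITION & SPEC =====
def Spec_letter_swaps_generator (letters : String) (out : List String) : Prop := out = letter_swaps_generator_alt letters
instance (letters : String) (out : List String) : Decidable (Spec_letter_swaps_generator letters out) := by unfold Spec_letter_swaps_generator; infer_instance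

-- ===== CLAIM (what is proved, stated in full; the proofs are below) =====
def Claim_equal_letter_swaps_generator : Prop := ∀ (letters : String), Dom_letter_swaps_generator letters → Spec_letter_swaps_generator letters (letter_swaps_generator letters)

-- ===== LEMMAS AND PROOFS =====

-- shared vocabulary for the proofs
def mkS (p : Char × Char) : String := String.ofList [p.1, p.2]

def normP (c d : Char) : Char × Char := if c.toNat < d.toNat then (c, d) else (d, c)

-- the (unsorted) pair list A builds, at the Char × Char level
def allP : List Char → List (Char × Char)
  | [] => []
  | c :: t => t.map (normP c) ++ allP t

def C2 (m : Nat) : Nat := m * (m - 1) / 2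

-- the pair list B builds, at the Char × Char level
def buildP (m : Char → Nat) : List Char → List (Char × Char)
  | [] => []
  | a :: rest =>
      List.replicate (C2 (m a)) (a, a)
        ++ rest.flatMap (fun b => List.replicate (m a * m b) (a, b))
        ++ buildP m rest

-- how many times a normalised pair occurs
def pairCount (cs : List Char) (x y : Char) : Nat :=
  if x < y then cs.count x * cs.count y else if x = y then C2 (cs.count x) else 0

def pairLe (p q : Char × Char) : Prop := p.1 < q.1 ∨ (p.1 = q.1 ∧ p.2 ≤ q.2)

theorem C2_succ (m : Nat) : C2 (m+1) = m + C2 m := by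
  cases m with
  | zero => decide
  | succ k =>
    unfold C2
    rw [show k+1+1-1 = k+1 from rfl, show k+1-1=k from rfl,
      show (k+1+1)*(k+1) = 2*(k+1) + (k+1)*k from by ring,
      Nat.mul_add_div (by norm_num)]

theorem char_lt (c d : Char) : c.toNat < d.toNat ↔ c < d := gt_iff_lt

theorem normP_fst_le (c d x y : Char) (h : normP c d = (x, y)) : x.toNat ≤ y.toNat := by
  unfold normP at h
  split at h <;> rename_i hcd <;> cases h <;> omega

theorem count_allP (cs : List Char) (x y : Char) :
    (allP cs).count (x, y) = pairCount cs x y := by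
  induction cs with
  | nil => unfold pairCount; simp [allP, C2]
  | cons c t ih =>
    have hmap : ((t.map (normP c)).count (x,y)) = t.countP (fun d => normP c d == (x,y)) := by
      simp [List.count, List.countP_map]; rfl
    simp only [allP, List.count_append, hmap, ih]
    rcases lt_trichotomy x y with hxy | hxy | hxy
    · by_cases hcx : c = x
      · subst hcx
        have hM : t.countP (fun d => normP c d == (c, y)) = t.count y := by
          unfold List.count
          apply List.countP_congr
          intro d _
          simp only [beq_iff_eq]
          constructor
          · intro h; unfold normP at h; split at h <;> rename_i hcd <;> cases h
            · rfl
            · exact absurd hxy (lt_irrefl _)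
          · intro h; subst h; unfold normP
            rw [if_pos ((char_lt _ _).2 hxy)]
        rw [hM]
        unfold pairCount
        simp [hxy, hxy.ne]
        ring
      · by_cases hcy : c = y
        · subst hcy
          have hM : t.countP (fun d => normP c d == (x, c)) = t.count x := by
            unfold List.count
            apply List.countP_congr
            intro d _
            simp only [beq_iff_eq]
            constructor
            · intro h; unfold normP at h; split at h <;> rename_i hcd <;> cases h
              · exact absurd hxy (lt_irrefl _)
              · rfl
            · intro h; subst h; unfold normP
              rw [if_neg (by rw [char_lt]; exact not_lt.2 hxy.le)]
          rw [hM]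
          unfold pairCount
          simp [hxy, hxy.ne']
          ring
        · have hM : t.countP (fun d => normP c d == (x, y)) = 0 := by
            rw [List.countP_eq_zero]
            intro d _
            simp only [beq_iff_eq]
            intro h; unfold normP at h; split at h <;> rename_i hcd <;> cases h
            · exact hcx rfl
            · exact hcy rfl
          rw [hM]
          unfold pairCount
          simp [hxy, hcx, hcy]
    · subst hxy
      by_cases hcx : c = x
      · subst hcx
        have hM : t.countP (fun d => normP c d == (c, c)) = t.count c := by
          unfold List.count
          apply List.countP_congr
          intro d _
          simp only [beq_iff_eq]
          constructor
          · intro h; unfold normP at h; split at h <;> rename_i hcd <;> cases h <;> rfl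
          · intro h; subst h; unfold normP; simp
        rw [hM]
        unfold pairCount
        simp [C2_succ]
      · have hM : t.countP (fun d => normP c d == (x, x)) = 0 := by
          rw [List.countP_eq_zero]
          intro d _
          simp only [beq_iff_eq]
          intro h; unfold normP at h; split at h <;> rename_i hcd <;> cases h
          · exact hcx rfl
          · exact hcx rfl
        rw [hM]
        unfold pairCount
        simp [hcx]
    · have hM : t.countP (fun d => normP c d == (x, y)) = 0 := by
        rw [List.countP_eq_zero]
        intro d _
        simp only [beq_iff_eq]
        intro h
        have := normP_fst_le c d x y h
        have := (char_lt y x).2 hxy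
        omega
      rw [hM]
      unfold pairCount
      simp [not_lt.2 hxy.le, hxy.ne']

theorem count_flatMap' {α β : Type} [BEq β] [LawfulBEq β] (l : List α) (f : α → List β) (b : β) :
    (l.flatMap f).count b = (l.map (fun a => (f a).count b)).sum := by
  induction l with
  | nil => simp
  | cons x t ih => simp [List.flatMap_cons, List.count_append, ih]

theorem sum_indicator (rest : List Char) (hnd : rest.Nodup) (a x y : Char) (f : Char → Nat) :
    (rest.map (fun b => if ((a, b) : Char × Char) = (x, y) then f b else 0)).sum
      = if a = x ∧ y ∈ rest then f y else 0 := by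
  induction rest with
  | nil => simp
  | cons b r ih =>
    rcases List.nodup_cons.1 hnd with ⟨hbr, hndr⟩
    by_cases h : ((a, b) : Char × Char) = (x, y)
    · obtain ⟨rfl, rfl⟩ := Prod.mk.injEq .. ▸ h
      simp only [List.map_cons, List.sum_cons, ih hndr]
      simp [hbr]
    · simp only [List.map_cons, List.sum_cons, if_neg h, ih hndr, Nat.zero_add]
      by_cases hax : a = x
      · subst hax
        by_cases hyr : y ∈ r
        · simp [hyr, List.mem_cons.2 (Or.inr hyr)]
        · have hyb : y ≠ b := fun hh => h (by rw [hh])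
          simp [hyr, hyb, List.mem_cons]
      · simp [hax]

theorem mem_flat_pairs (a : Char) (k : Char → Nat) (rest : List Char) (q : Char × Char)
    (hq : q ∈ rest.flatMap (fun b => List.replicate (k b) (a, b))) :
    q.1 = a ∧ q.2 ∈ rest := by
  rcases List.mem_flatMap.1 hq with ⟨b, hb, hmem⟩
  rcases List.eq_of_mem_replicate hmem with rfl
  exact ⟨rfl, hb⟩

theorem fst_mem_of_mem_buildP (m : Char → Nat) (l : List Char) (p : Char × Char)
    (hp : p ∈ buildP m l) : p.1 ∈ l := by
  induction l with
  | nil => simp [buildP] at hp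
  | cons a rest ih =>
    simp only [buildP, List.mem_append] at hp
    rcases hp with (hp | hp) | hp
    · rcases List.eq_of_mem_replicate hp with rfl
      exact List.mem_cons_self
    · exact (mem_flat_pairs a _ rest p hp).1 ▸ List.mem_cons_self
    · exact List.mem_cons_of_mem a (ih hp)

theorem pw_flat (a : Char) (k : Char → Nat) :
    ∀ (rest : List Char), (∀ b ∈ rest, a < b) → rest.Pairwise (· < ·) →
      (rest.flatMap fun b => List.replicate (k b) (a, b)).Pairwise pairLe
  | [], _, _ => by simp
  | b :: r, ha, hr => by
    have hb : ∀ c ∈ r, b < c := (List.pairwise_cons.1 hr).1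
    have hr' : r.Pairwise (· < ·) := (List.pairwise_cons.1 hr).2
    have ha' : ∀ c ∈ r, a < c := fun c hc => ha c (List.mem_cons_of_mem b hc)
    simp only [List.flatMap_cons]
    rw [List.pairwise_append]
    refine ⟨?_, pw_flat a k r ha' hr', ?_⟩
    · exact List.pairwise_replicate.2 (Or.inr (Or.inr ⟨rfl, le_refl _⟩))
    · intro p hp q hq
      rcases List.eq_of_mem_replicate hp with rfl
      rcases mem_flat_pairs a _ r q hq with ⟨h1, h2⟩
      exact Or.inr ⟨h1.symm, le_of_lt (hb q.2 h2)⟩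

theorem pairwise_buildP (m : Char → Nat) (l : List Char) (hpw : l.Pairwise (· < ·)) :
    (buildP m l).Pairwise pairLe := by
  induction l with
  | nil => simp [buildP]
  | cons a rest ih =>
    rcases List.pairwise_cons.1 hpw with ⟨ha, hrest⟩
    simp only [buildP]
    rw [List.pairwise_append, List.pairwise_append]
    refine ⟨⟨?_, pw_flat a _ rest ha hrest, ?_⟩, ih hrest, ?_⟩
    · exact List.pairwise_replicate.2 (Or.inr (Or.inr ⟨rfl, le_refl _⟩))
    · intro p hp q hq
      rcases List.eq_of_mem_replicate hp with rfl
      rcases mem_flat_pairs a _ rest q hq with ⟨h1, h2⟩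
      exact Or.inr ⟨h1.symm, le_of_lt (ha q.2 h2)⟩
    · intro p hp q hq
      have hq1 : q.1 ∈ rest := fst_mem_of_mem_buildP m rest q hq
      have hp1 : p.1 = a := by
        rcases List.mem_append.1 hp with hp | hp
        · rcases List.eq_of_mem_replicate hp with rfl; rfl
        · exact (mem_flat_pairs a _ rest p hp).1
      exact Or.inl (hp1 ▸ ha q.1 hq1)

theorem count_buildP (m : Char → Nat) (l : List Char) (hpw : l.Pairwise (· < ·)) (x y : Char) :
    (buildP m l).count (x, y) =
      if x < y then (if x ∈ l ∧ y ∈ l then m x * m y else 0)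
      else if x = y then (if x ∈ l then C2 (m x) else 0) else 0 := by
  induction l with
  | nil =>
    simp only [buildP, List.count_nil, List.not_mem_nil, false_and, if_false]
    split <;> simp
  | cons a rest ih =>
    rcases List.pairwise_cons.1 hpw with ⟨ha, hrest⟩
    have hanr : a ∉ rest := fun h => lt_irrefl a (ha a h)
    have hnd : rest.Nodup := hrest.imp (fun h => ne_of_lt h)
    simp only [buildP, List.count_append, count_flatMap', List.count_replicate,
      ih hrest, beq_iff_eq]
    rw [sum_indicator rest hnd a x y (fun b => m a * m b)]
    rcases lt_trichotomy x y with hxy | hxy | hxy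
    · rw [if_neg (by simp only [Prod.mk.injEq]; rintro ⟨h1, h2⟩; exact hxy.ne (h1.symm.trans h2))]
      by_cases hx : a = x
      · subst hx
        have hyr : y ≠ a := hxy.ne'
        simp [hxy, List.mem_cons, hanr, hyr]
      · by_cases hy : y = a
        · subst hy
          have hxr : x ∉ rest := fun h => absurd (ha x h) (lt_asymm hxy)
          simp [hxy, List.mem_cons, hx, hxr, Ne.symm hx]
        · have hax : ¬ (a = x ∧ y ∈ rest) := fun h => hx h.1
          simp [hxy, List.mem_cons, Ne.symm hx, hy, hax]
    · subst hxy
      have hT2 : ¬ (a = x ∧ x ∈ rest) := by rintro ⟨rfl, h⟩; exact hanr h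
      by_cases hx : a = x
      · subst hx
        simp [hanr]
      · rw [if_neg (by simp only [Prod.mk.injEq]; rintro ⟨h1, h2⟩; exact hx h1)]
        simp [List.mem_cons, Ne.symm hx, hT2]
    · have h1 : ¬ x < y := lt_asymm hxy
      have h2 : x ≠ y := hxy.ne'
      have h3 : ¬ (a = x ∧ y ∈ rest) := by
        rintro ⟨rfl, hyr⟩
        exact absurd (ha y hyr) (lt_asymm hxy)
      rw [if_neg (by simp only [Prod.mk.injEq]; rintro ⟨ha1, ha2⟩; exact h2 (ha1.symm.trans ha2))]
      simp [h1, h2, h3]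

theorem ite_norm (acc : List String) (c d : Char) :
    (if c.toNat < d.toNat then acc ++ [String.ofList [c, d]] else acc ++ [String.ofList [d, c]])
      = acc ++ [mkS (normP c d)] := by
  unfold mkS normP; split <;> rfl

theorem idx_allP (cs : List Char) :
    (List.range cs.length).flatMap
      (fun i => (cs.drop (i+1)).map (fun d => mkS (normP (cs.getD i ' ') d)))
    = (allP cs).map mkS := by
  induction cs with
  | nil => simp [allP]
  | cons c t ih =>
    rw [show (c :: t).length = t.length + 1 from rfl, List.range_succ_eq_map]
    simp only [List.flatMap_cons, List.flatMap_map]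
    have h0 : (c :: t).drop 1 = t := rfl
    have hgd : ∀ i : Nat, (c :: t).getD (Nat.succ i) ' ' = t.getD i ' ' := fun i => rfl
    simp only [List.getD_cons_zero, h0, hgd, List.drop_succ_cons]
    rw [ih]
    simp [allP, List.map_map]

theorem swapsA_eq (letters : String) :
    ((PySem.List.pyRange 0 (PySem.Str.len letters) 1).foldl (fun swaps i =>
      (PySem.List.pyRange (i + 1) (PySem.Str.len letters) 1).foldl (fun swaps j =>
        if (PySem.List.pyGetD letters.toList i ' ').toNat < (PySem.List.pyGetD letters.toList j ' ').toNat then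
          swaps ++ [String.ofList [PySem.List.pyGetD letters.toList i ' ', PySem.List.pyGetD letters.toList j ' ']]
        else
          swaps ++ [String.ofList [PySem.List.pyGetD letters.toList j ' ', PySem.List.pyGetD letters.toList i ' ']])
        swaps)
      []) = (allP letters.toList).map mkS := by
  have hlen : PySem.Str.len letters = PySem.List.len letters.toList := by simp [pysem]
  rw [hlen]
  rw [PySem.List.foldl_congr_mem _ _
    (fun swaps i => swaps ++ ((letters.toList.drop (i.toNat+1)).map
      (fun d => mkS (normP (PySem.List.pyGetD letters.toList i ' ') d)))) _ ?_]
  · rw [PySem.List.foldl_append_eq_flatMap]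
    rw [show PySem.List.len letters.toList = (letters.toList.length : Int) by simp [pysem]]
    rw [PySem.List.pyRange_zero_natCast]
    rw [List.flatMap_map]
    have : ∀ i : Nat, (fun i : Int => letters.toList.drop (i.toNat+1) |>.map
        (fun d => mkS (normP (PySem.List.pyGetD letters.toList i ' ') d))) ((i : Int))
        = (letters.toList.drop (i+1)).map (fun d => mkS (normP (letters.toList.getD i ' ') d)) := by
      intro i; simp [pysem]
    simp only [this]
    exact idx_allP letters.toList
  · intro acc i hi
    have hi0 : 0 ≤ i := (PySem.List.mem_pyRange_one.1 hi).1
    have : ∀ acc : List String, ∀ j ∈ PySem.List.pyRange (i+1) (PySem.List.len letters.toList) 1,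
        (if (PySem.List.pyGetD letters.toList i ' ').toNat < (PySem.List.pyGetD letters.toList j ' ').toNat then
          acc ++ [String.ofList [PySem.List.pyGetD letters.toList i ' ', PySem.List.pyGetD letters.toList j ' ']]
        else
          acc ++ [String.ofList [PySem.List.pyGetD letters.toList j ' ', PySem.List.pyGetD letters.toList i ' ']])
        = acc ++ [mkS (normP (PySem.List.pyGetD letters.toList i ' ') (PySem.List.pyGetD letters.toList j ' '))] := by
      intro acc j _; exact ite_norm acc _ _
    rw [PySem.List.foldl_congr_mem _ _ _ _ (fun acc j hj => this acc j hj)]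
    rw [PySem.List.foldl_append_singleton_eq_map
      (fun j => mkS (normP (PySem.List.pyGetD letters.toList i ' ') (PySem.List.pyGetD letters.toList j ' ')))]
    congr 1
    rw [show (fun j => mkS (normP (PySem.List.pyGetD letters.toList i ' ') (PySem.List.pyGetD letters.toList j ' ')))
      = (fun d => mkS (normP (PySem.List.pyGetD letters.toList i ' ') d)) ∘ (fun j => PySem.List.pyGetD letters.toList j ' ') from rfl]
    rw [← List.map_map]
    rw [PySem.List.map_pyGetD_pyRange letters.toList ' ' (by omega : (0:Int) ≤ i + 1)]
    have ht : (i+1).toNat = i.toNat + 1 := by omega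
    rw [ht]

theorem c2_int (m : Nat) :
    PySem.Int.floordiv ((m:Int) * ((m:Int) - 1)) 2 = (C2 m : Int) := by
  unfold C2
  cases m with
  | zero => simp [PySem.Int.floordiv]
  | succ k =>
    have : ((k+1:Nat):Int) * (((k+1:Nat):Int) - 1) = (((k+1) * k : Nat) : Int) := by push_cast; ring
    rw [this, show ((k+1) * (k+1-1) : Nat) = ((k+1) * k : Nat) from rfl]
    exact_mod_cast PySem.Int.floordiv_natCast ((k+1)*k) 2

theorem foldB (M : Char → Nat) (whole : List Char) (u : List Char) :
    ∀ (pre : List Char) (acc : List String), whole = pre ++ u →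
    (PySem.List.enumerate u (pre.length : Int)).foldl
      (fun swaps ia =>
        (PySem.List.slice whole (some (ia.1 + 1)) none).foldl
          (fun swaps b => swaps ++ PySem.List.pyRepeat [String.ofList [ia.2, b]] ((M ia.2 : Int) * (M b : Int)))
          (swaps ++ PySem.List.pyRepeat [String.ofList [ia.2, ia.2]]
            (PySem.Int.floordiv ((M ia.2 : Int) * ((M ia.2 : Int) - 1)) 2)))
      acc
    = acc ++ (buildP M u).map mkS := by
  induction u generalizing whole with
  | nil => intro pre acc h; simp [buildP, PySem.List.enumerate]
  | cons a rest ih =>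
    intro pre acc h
    rw [PySem.List.enumerate_cons, List.foldl_cons]
    have hslice : PySem.List.slice whole (some ((pre.length:Int) + 1)) none = rest := by
      rw [PySem.List.slice_from whole (by omega)]
      rw [show (((pre.length:Int))+1).toNat = pre.length + 1 from by omega]
      rw [h, show pre ++ a :: rest = (pre ++ [a]) ++ rest from by simp]
      rw [show (pre.length + 1) = (pre ++ [a]).length from by simp]
      exact List.drop_left
    simp only [hslice]
    rw [PySem.List.foldl_append_eq_flatMap
      (fun b => PySem.List.pyRepeat [String.ofList [a, b]] ((M a : Int) * (M b : Int)))]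
    rw [show ((pre.length:Int)) + 1 = (((pre ++ [a]).length : Nat) : Int) from by simp]
    rw [ih whole (pre ++ [a]) _ (by simp [h])]
    simp only [buildP, List.map_append, PySem.List.pyRepeat_singleton, c2_int, List.append_assoc]
    congr 2
    · simp [mkS, List.map_replicate]
    congr 1
    rw [List.map_flatMap]
    simp only [mkS, List.map_replicate, ← Nat.cast_mul, Int.toNat_natCast]

theorem outB_eq (letters : String) :
    letter_swaps_generator_alt letters =
      (buildP (fun c => letters.toList.count c)
        (PySem.List.sorted (PySem.Set.ofList letters.toList) (fun x => x) false)).map mkS := by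
  unfold letter_swaps_generator_alt
  have hgd : ∀ c : Char,
      (letters.toList.foldl (fun d c => d.insert c (d.getD c 0 + 1)) PySem.Dict.empty).getD c 0
        = ((letters.toList.count c : Nat) : Int) := by
    intro c
    rw [PySem.Dict.getD_foldl_insert_add_one]
    simp
  have hupd : PySem.Set.update ([] : List Char) letters.toList = PySem.Set.ofList letters.toList := by
    rw [PySem.Set.ofList_eq_foldl]; rfl
  simp only [PySem.Dict.keys_foldl_insert, PySem.Dict.keys_empty, hupd, hgd]
  have := foldB (fun c => letters.toList.count c)
    (PySem.List.sorted (PySem.Set.ofList letters.toList) (fun x => x) false)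
    (PySem.List.sorted (PySem.Set.ofList letters.toList) (fun x => x) false)
    [] [] rfl
  simpa only [List.length_nil, Nat.cast_zero, List.nil_append] using this

theorem perm_buildP_allP (cs : List Char) :
    ((buildP (fun c => cs.count c)
        (PySem.List.sorted (PySem.Set.ofList cs) (fun x => x) false)).map mkS).Perm
      ((allP cs).map mkS) := by
  apply List.Perm.map
  rw [List.perm_iff_count]
  intro p
  rcases p with ⟨x, y⟩
  rw [count_buildP _ _ (PySem.List.sorted_ofList_pairwise_lt cs) x y, count_allP]
  have hmem : ∀ c : Char,
      (c ∈ PySem.List.sorted (PySem.Set.ofList cs) (fun x => x) false) ↔ c ∈ cs := fun c =>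
    (PySem.List.mem_sorted _ _ _ c).trans (PySem.Set.mem_ofList cs c)
  unfold pairCount
  by_cases hxy : x < y
  · simp only [if_pos hxy]
    by_cases hx : x ∈ cs
    · by_cases hy : y ∈ cs
      · simp [hmem, hx, hy]
      · simp [hmem, hx, hy, List.count_eq_zero.2 hy]
    · simp [hmem, hx, List.count_eq_zero.2 hx]
  · simp only [if_neg hxy]
    by_cases hxx : x = y
    · subst hxx
      by_cases hx : x ∈ cs
      · simp [hmem, hx]
      · simp [hmem, hx, List.count_eq_zero.2 hx, C2]
    · simp [hxx]

theorem sorted2_eq_sorted_lex (xs : List String) :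
    PySem.List.sorted2 xs
      (fun x => PySem.List.pyGetD x.toList 0 ' ')
      (fun x => PySem.List.pyGetD x.toList 1 ' ') false =
    PySem.List.sorted xs
      (fun x => toLex (PySem.List.pyGetD x.toList 0 ' ', PySem.List.pyGetD x.toList 1 ' ')) false := by
  rw [PySem.List.sorted_eq_foldl_insertBy]
  simp only [PySem.List.sorted2]
  congr 1
  funext acc x
  congr 1
  funext a b
  rcases lt_trichotomy (PySem.List.pyGetD a.toList 0 ' ') (PySem.List.pyGetD b.toList 0 ' ') with h|h|h
  · simp [Prod.Lex.toLex_lt_toLex, h, lt_asymm h]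
  · simp [Prod.Lex.toLex_lt_toLex, h]
  · simp [Prod.Lex.toLex_lt_toLex, h, lt_asymm h, h.ne']

theorem key1_mkS (p : Char × Char) : PySem.List.pyGetD (mkS p).toList 0 ' ' = p.1 := by
  simp [mkS, pysem]

theorem key2_mkS (p : Char × Char) : PySem.List.pyGetD (mkS p).toList 1 ' ' = p.2 := by
  simp [mkS, pysem]

-- ===== VERDICT (by name: the statement is the Claim_ definition above) =====
theorem letter_swaps_generator_spec : Claim_equal_letter_swaps_generator := by
  intro letters _
  unfold Spec_letter_swaps_generator letter_swaps_generator
  rw [swapsA_eq letters, sorted2_eq_sorted_lex, outB_eq letters]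
  apply List.Perm.eq_of_pairwise
    (le := fun a b =>
      (toLex (PySem.List.pyGetD a.toList 0 ' ', PySem.List.pyGetD a.toList 1 ' ') : Lex (Char × Char)) ≤
        toLex (PySem.List.pyGetD b.toList 0 ' ', PySem.List.pyGetD b.toList 1 ' '))
  · intro a b ha hb hab hba
    rcases List.mem_map.1 ((PySem.List.mem_sorted _ _ _ a).1 ha) with ⟨p, _, rfl⟩
    rcases List.mem_map.1 hb with ⟨q, _, rfl⟩
    simp only [key1_mkS, key2_mkS] at hab hba
    have : toLex (p.1, p.2) = toLex (q.1, q.2) := le_antisymm hab hba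
    have hpq : p = q := by
      have := toLex.injective this
      exact Prod.ext (congrArg Prod.fst this) (congrArg Prod.snd this)
    rw [hpq]
  · exact PySem.List.sorted_pairwise _ _
  · apply List.Pairwise.map mkS
      (fun p q hpq => ?_)
      (pairwise_buildP (fun c => letters.toList.count c) _
        (PySem.List.sorted_ofList_pairwise_lt letters.toList))
    simp only [key1_mkS, key2_mkS]
    exact Prod.Lex.toLex_le_toLex.2 hpq
  · exact (PySem.List.sorted_perm _ _ _).trans (perm_buildP_allP letters.toList).symm
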